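-- pv_equiv track=rewrite | github.com/ashrid/form-filler | src/pdf/transfer_pdf.py | _generate_filename
-- ===== SOURCE A (Python) =====
-- def _generate_filename(form_data: dict) -> str:
--     """Generate filename: Asset Transfer - From {emp id}-{name} to {emp id}-{name}.pdf"""
--     from_emp_id = form_data.get("from_emp_id", "").strip() or "Unknown"
--     from_name = form_data.get("from_name", "").strip() or "Unknown"
--     to_emp_id = form_data.get("to_emp_id", "").strip() or "Unknown"
--     to_name = form_data.get("to_name", "").strip() or "Unknown"
--
--     # Clean characters that aren't allowed in filenames
--     invalid_chars = '<>:"/\\|?*'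
--     for char in invalid_chars:
--         from_emp_id = from_emp_id.replace(char, '_')
--         from_name = from_name.replace(char, '_')
--         to_emp_id = to_emp_id.replace(char, '_')
--         to_name = to_name.replace(char, '_')
--
--     return f"Asset Transfer - From {from_emp_id}-{from_name} to {to_emp_id}-{to_name}.pdf"
-- ===== SOURCE B (Python) =====
-- _INVALID = set('<>:"/\\|?*')
--
--
-- def _generate_filename(form_data: dict) -> str:
--     """Generate filename: Asset Transfer - From {emp id}-{name} to {emp id}-{name}.pdf"""
--     def raw(key):
--         return form_data.get(key, "").strip() or "Unknown"
--
--     # Assemble first, then sanitize the whole string in one pass: the fixed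
--     # template text contains no invalid characters, so this is equivalent.
--     assembled = (
--         f"Asset Transfer - From {raw('from_emp_id')}-{raw('from_name')}"
--         f" to {raw('to_emp_id')}-{raw('to_name')}.pdf"
--     )
--     return ''.join('_' if c in _INVALID else c for c in assembled)
-- ===== Notes on version B (the rewrite author's own statement) =====
-- stated objective: alternative
-- what changed: A sanitizes four separate field variables with nine repeated str.replace passes and then formats; B reverses the decomposition: it assembles the final filename first from the raw fields and then sanitizes the whole assembled string in a single character-level pass (sound because the fixed template text contains no invalid characters).
import Mathlib
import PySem

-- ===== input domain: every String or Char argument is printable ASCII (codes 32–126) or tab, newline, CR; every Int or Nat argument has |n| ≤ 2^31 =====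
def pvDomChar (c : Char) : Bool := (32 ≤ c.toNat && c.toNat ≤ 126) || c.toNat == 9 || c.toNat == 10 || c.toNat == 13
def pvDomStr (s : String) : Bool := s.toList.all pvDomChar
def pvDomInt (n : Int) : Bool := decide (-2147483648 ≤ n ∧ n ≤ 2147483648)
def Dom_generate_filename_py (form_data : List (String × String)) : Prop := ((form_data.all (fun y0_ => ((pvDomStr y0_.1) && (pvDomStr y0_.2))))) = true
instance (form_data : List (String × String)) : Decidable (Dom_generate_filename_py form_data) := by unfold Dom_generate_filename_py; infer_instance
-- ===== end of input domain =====

-- B reverses A's decomposition: A sanitizes four field variables with nine repeated replace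
-- passes and then formats; B assembles the filename first and sanitizes the whole string in
-- one character pass (objective: alternative; the template has no invalid characters).

-- shared helper: form_data.get(key, "").strip() or "Unknown"  (both Pythons compute this the same way)
def pvRawField (form_data : List (String × String)) (key : String) : String :=
  let s := PySem.Str.strip (((form_data.find? (fun p => p.1 == key)).map (fun p => p.2)).getD "")
  if s = "" then "Unknown" else s

-- invalid_chars = '<>:"/\|?*'
def pvInvalid : List Char := ['<', '>', ':', '"', '/', '\\', '|', '?', '*']

-- ===== PORT A =====
-- the final f-string of A
def pvFmt (st : String × String × String × String) : String :=
  "Asset Transfer - From " ++ st.1 ++ "-" ++ st.2.1 ++ " to " ++ st.2.2.1 ++ "-" ++ st.2.2.2 ++ ".pdf"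

def generate_filename_py (form_data : List (String × String)) : String :=
  pvFmt (pvInvalid.foldl
    (fun (q : String × String × String × String) ch =>
      (PySem.Str.replace q.1 (String.ofList [ch]) "_",
       PySem.Str.replace q.2.1 (String.ofList [ch]) "_",
       PySem.Str.replace q.2.2.1 (String.ofList [ch]) "_",
       PySem.Str.replace q.2.2.2 (String.ofList [ch]) "_"))
    (pvRawField form_data "from_emp_id", pvRawField form_data "from_name",
     pvRawField form_data "to_emp_id", pvRawField form_data "to_name"))

-- ===== PORT B =====
-- '_' if c in _INVALID else c   (the per-character sanitizer of the single pass)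
def pvTrans (c : Char) : Char := if pvInvalid.contains c then '_' else c

def generate_filename_py_alt (form_data : List (String × String)) : String :=
  let assembled :=
    "Asset Transfer - From " ++ pvRawField form_data "from_emp_id" ++ "-" ++
      pvRawField form_data "from_name" ++ " to " ++ pvRawField form_data "to_emp_id" ++ "-" ++
      pvRawField form_data "to_name" ++ ".pdf"
  String.ofList (assembled.toList.map pvTrans)

-- ===== PRECONDITION & SPEC =====
def Spec_generate_filename_py (form_data : List (String × String)) (out : String) : Prop := out = generate_filename_py_alt form_data
instance (form_data : List (String × String)) (out : String) : Decidable (Spec_generate_filename_py form_data out) := by unfold Spec_generate_filename_py; infer_instance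

-- ===== CLAIM (what is proved, stated in full; the proofs are below) =====
def Claim_equal_generate_filename_py : Prop := ∀ (form_data : List (String × String)), Dom_generate_filename_py form_data → Spec_generate_filename_py form_data (generate_filename_py form_data)

-- ===== LEMMAS AND PROOFS =====

-- replace with a single-char pattern is a per-character map
theorem pv_go_single (a : Char) : ∀ (fuel : Nat) (l acc : List Char), l.length ≤ fuel →
    PySem.Chars.replace.go [a] ['_'] fuel l acc
      = acc.reverse ++ l.map (fun c => if c == a then '_' else c) := by
  intro fuel
  induction fuel with
  | zero =>
    intro l acc h
    have : l = [] := List.eq_nil_of_length_eq_zero (Nat.le_zero.mp h)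
    subst this
    simp [PySem.Chars.replace.go]
  | succ n ih =>
    intro l acc h
    cases l with
    | nil => simp [PySem.Chars.replace.go]
    | cons c t =>
      by_cases hac : a = c
      · subst hac
        have h1 : PySem.Chars.replace.go [a] ['_'] (n + 1) (a :: t) acc
            = PySem.Chars.replace.go [a] ['_'] n t (['_'].reverse ++ acc) := by
          simp [PySem.Chars.replace.go, List.isPrefixOf]
        rw [h1, ih t (['_'].reverse ++ acc) (Nat.le_of_succ_le_succ h)]
        simp
      · have h1 : PySem.Chars.replace.go [a] ['_'] (n + 1) (c :: t) acc
            = PySem.Chars.replace.go [a] ['_'] n t (c :: acc) := by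
          simp [PySem.Chars.replace.go, List.isPrefixOf, hac]
        rw [h1, ih t (c :: acc) (by simpa using Nat.le_of_succ_le_succ h)]
        have hca : c ≠ a := fun h' => hac h'.symm
        simp [hca]

theorem pv_replace_single (s : String) (a : Char) :
    PySem.Str.replace s (String.ofList [a]) "_"
      = String.ofList (s.toList.map (fun c => if c == a then '_' else c)) := by
  show String.ofList (PySem.Chars.replace s.toList (String.ofList [a]).toList "_".toList) = _
  have h1 : (String.ofList [a]).toList = [a] := by simp
  have h2 : "_".toList = ['_'] := rfl
  rw [h1, h2]
  unfold PySem.Chars.replace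
  simp only [List.isEmpty_cons, if_false, Bool.false_eq_true]
  rw [pv_go_single a s.toList.length s.toList [] (Nat.le_refl _)]
  simp

-- folding single-char replaces over a string is a single map of the folded char function
theorem pv_fold_replace (l : List Char) : ∀ (s : String),
    l.foldl (fun st a => PySem.Str.replace st (String.ofList [a]) "_") s
      = String.ofList (s.toList.map (fun c => l.foldl (fun x a => if x == a then '_' else x) c)) := by
  induction l with
  | nil => intro s; simp
  | cons a t ih =>
    intro s
    simp only [List.foldl_cons]
    rw [ih, pv_replace_single]
    simp [List.map_map, Function.comp_def]

-- once a char has been turned into '_' it stays '_'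
theorem pv_fold_underscore (t : List Char) :
    t.foldl (fun x a => if x = a then '_' else x) '_' = '_' := by
  induction t with
  | nil => rfl
  | cons a t ih => simp only [List.foldl_cons, ite_self]; exact ih

-- folding the invalid chars over one char is the membership test
theorem pv_foldl_mark (l : List Char) : ∀ (c : Char),
    l.foldl (fun x a => if x = a then '_' else x) c = if c ∈ l then '_' else c := by
  induction l with
  | nil => intro c; rfl
  | cons a t ih =>
    intro c
    by_cases hc : c = a
    · subst hc
      simp [pv_fold_underscore]
    · simp [hc, ih c]

theorem pv_point (c : Char) :
    pvInvalid.foldl (fun x a => if x == a then '_' else x) c = pvTrans c := by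
  by_cases h : c ∈ pvInvalid <;> simp [pvTrans, pv_foldl_mark, h]

-- the 4-tuple fold splits into four independent string folds
theorem pv_fold_tuple (g : Char → String → String) (l : List Char) :
    ∀ (q : String × String × String × String),
    l.foldl (fun (q : String × String × String × String) ch =>
        (g ch q.1, g ch q.2.1, g ch q.2.2.1, g ch q.2.2.2)) q
      = (l.foldl (fun s ch => g ch s) q.1, l.foldl (fun s ch => g ch s) q.2.1,
         l.foldl (fun s ch => g ch s) q.2.2.1, l.foldl (fun s ch => g ch s) q.2.2.2) := by
  induction l with
  | nil => intro q; rfl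
  | cons a t ih => intro q; simp only [List.foldl_cons]; rw [ih]

set_option maxHeartbeats 1000000 in
theorem pv_field (form_data : List (String × String)) (key : String) :
    pvInvalid.foldl (fun s ch => PySem.Str.replace s (String.ofList [ch]) "_")
        (pvRawField form_data key)
      = String.ofList ((pvRawField form_data key).toList.map pvTrans) := by
  rw [pv_fold_replace]
  exact congrArg String.ofList (List.map_congr_left (fun c _ => pv_point c))

-- the fixed template fragments are fixed points of the sanitizer
theorem pv_lit_fixed (l : List Char) (h : l.all (fun c => !pvInvalid.contains c) = true) :
    l.map pvTrans = l := by
  conv_rhs => rw [← List.map_id l]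
  apply List.map_congr_left
  intro c hc
  show pvTrans c = c
  have := List.all_eq_true.mp h c hc
  simp [pvTrans]
  intro hmem
  simp [hmem] at this

-- ===== VERDICT (by name: the statement is the Claim_ definition above) =====
set_option maxHeartbeats 1000000 in
theorem generate_filename_py_spec : Claim_equal_generate_filename_py := by
  intro form_data _
  show generate_filename_py form_data = generate_filename_py_alt form_data
  unfold generate_filename_py generate_filename_py_alt pvFmt
  rw [pv_fold_tuple (fun ch s => PySem.Str.replace s (String.ofList [ch]) "_")]
  simp only [pv_field]
  apply String.toList_inj.mp
  simp only [String.toList_append, List.map_append, String.toList_ofList]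
  rw [pv_lit_fixed "Asset Transfer - From ".toList (by decide),
      pv_lit_fixed "-".toList (by decide),
      pv_lit_fixed " to ".toList (by decide),
      pv_lit_fixed ".pdf".toList (by decide)]
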